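-- pv_equiv track=rewrite | github.com/brokolidev/python_sandbox | 기능개발.py | solution
-- ===== SOURCE A (Python) =====
-- import math
--
-- def solution(progresses, speeds):
--     complete = []
--
--     for progress, speed in zip(progresses, speeds):
--
--         # 배포에 소요되는 날짜를 구한다
--         left = 100 - progress
--         will_spend = math.ceil(left / speed)
--
--         if not complete or complete[-1][0] < will_spend:
--             complete.append([will_spend, 1])
--         else:
--             complete[-1][1] += 1
--
--     return [x[1] for x in complete]
-- ===== SOURCE B (Python) =====
-- def solution(progresses, speeds):
--     # exact integer ceiling of (100-p)/s, no float
--     days = [-((-(100 - p)) // s) for p, s in zip(progresses, speeds)]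
--
--     # Recursively split the day list at the first task whose day exceeds the
--     # current group leader: the leader plus every following task finishing within
--     # its day form one deploy group.
--     def groups(ds):
--         if not ds:
--             return []
--         leader = ds[0]
--         k = 1
--         while k < len(ds) and ds[k] <= leader:
--             k += 1
--         return [k] + groups(ds[k:])
--
--     return groups(days)
-- ===== Notes on version B (the rewrite author's own statement) =====
-- stated objective: alternative
-- what changed: Instead of A's single pass that mutates a [day,count] pair list with a threshold branch, B computes the exact-integer day list once and then recursively splits it: each group is the leader plus the maximal prefix of following tasks whose day does not exceed the leader's, returning the split lengths.
import Mathlib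
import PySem

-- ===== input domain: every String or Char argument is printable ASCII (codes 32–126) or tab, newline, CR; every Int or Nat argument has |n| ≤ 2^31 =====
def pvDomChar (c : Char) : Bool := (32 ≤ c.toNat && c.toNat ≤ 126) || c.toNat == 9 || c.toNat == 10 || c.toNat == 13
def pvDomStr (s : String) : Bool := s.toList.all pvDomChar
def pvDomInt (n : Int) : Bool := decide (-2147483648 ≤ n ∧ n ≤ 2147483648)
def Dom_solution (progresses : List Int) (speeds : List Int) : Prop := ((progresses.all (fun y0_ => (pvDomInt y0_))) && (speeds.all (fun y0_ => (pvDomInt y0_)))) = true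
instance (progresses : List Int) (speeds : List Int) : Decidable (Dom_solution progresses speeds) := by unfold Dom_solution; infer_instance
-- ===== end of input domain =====

-- B replaces A's mutating [day,count] pair loop by a recursive split of the day list
-- at each group leader; same O(n) cost, objective: alternative decomposition.
-- math.ceil(left/speed) uses float division in A; on the Dom-bounded ints it equals the exact
-- rational ceiling (|left| ≤ 2^31+100, so the quotient's distance to an integer exceeds half an ulp),
-- and is ported as ⌈(left:ℚ)/speed⌉.

-- ===== PORT A =====
-- one step of A's loop, on the (progress, speed) pair
def aStep (complete : List (Int × Int)) (ps : Int × Int) : List (Int × Int) :=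
  let left : Int := 100 - ps.1
  let will : Int := ⌈(left : ℚ) / (ps.2 : ℚ)⌉
  match complete.getLast? with
  | none => complete ++ [(will, 1)]
  | some last =>
      if last.1 < will then complete ++ [(will, 1)]
      else complete.dropLast ++ [(last.1, last.2 + 1)]

def solution (progresses : List Int) (speeds : List Int) : List Int :=
  ((progresses.zip speeds).foldl aStep []).map (fun x => x.2)

-- ===== PORT B =====
-- Source B's inner while loop: count the prefix of ds with day ≤ leader and return the rest
def splitRun (leader : Int) : List Int → Int × List Int
  | [] => (0, [])
  | x :: xs =>
      if x ≤ leader then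
        let r := splitRun leader xs
        (r.1 + 1, r.2)
      else (0, x :: xs)

theorem splitRun_length_le (leader : Int) (l : List Int) :
    (splitRun leader l).2.length ≤ l.length := by
  induction l with
  | nil => simp [splitRun]
  | cons x xs ih =>
      simp only [splitRun]
      split
      · simpa using Nat.le_succ_of_le ih
      · simp

def groups : List Int → List Int
  | [] => []
  | d :: ds => ((splitRun d ds).1 + 1) :: groups (splitRun d ds).2
termination_by l => l.length
decreasing_by
  exact Nat.lt_succ_of_le (splitRun_length_le d ds)

def solution_alt (progresses : List Int) (speeds : List Int) : List Int :=
  groups ((progresses.zip speeds).map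
    (fun ps => -(PySem.Int.floordiv (-(100 - ps.1)) ps.2)))

-- ===== PRECONDITION & SPEC =====
-- A raises ZeroDivisionError when a zipped speed is 0; exactly those inputs are excluded.
def Pre_solution (progresses : List Int) (speeds : List Int) : Prop :=
  ∀ p ∈ progresses.zip speeds, p.2 ≠ 0
instance (progresses : List Int) (speeds : List Int) : Decidable (Pre_solution progresses speeds) := by unfold Pre_solution; infer_instance

def pvWitness_solution : List Int × List Int := ([93, 30, 55], [1, 30, 5])

def Spec_solution (progresses : List Int) (speeds : List Int) (out : List Int) : Prop := out = solution_alt progresses speeds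
instance (progresses : List Int) (speeds : List Int) (out : List Int) : Decidable (Spec_solution progresses speeds out) := by unfold Spec_solution; infer_instance

-- ===== CLAIM (what is proved, stated in full; the proofs are below) =====
def Claim_equal_solution : Prop := ∀ (progresses : List Int) (speeds : List Int), Dom_solution progresses speeds → Pre_solution progresses speeds → Spec_solution progresses speeds (solution progresses speeds)

-- ===== LEMMAS AND PROOFS =====

-- rational ceiling of a/b equals Python's -((-a)//b), positive divisor
theorem ceil_eq_neg_floordiv_neg_of_pos (a b : Int) (hb : 0 < b) :
    ⌈(a : ℚ) / (b : ℚ)⌉ = -(PySem.Int.floordiv (-a) b) := by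
  have hbq : (0 : ℚ) < (b : ℚ) := by exact_mod_cast hb
  refine ((PySem.Int.neg_floordiv_neg_eq_iff_of_pos (a := a) (b := b)
    (q := ⌈(a : ℚ) / (b : ℚ)⌉) hb).mpr ?_).symm
  constructor
  · have hlt : ((⌈(a : ℚ) / (b : ℚ)⌉ - 1 : Int) : ℚ) < (a : ℚ) / (b : ℚ) := by
      by_contra hcon
      push Not at hcon
      have : (⌈(a : ℚ) / (b : ℚ)⌉ : ℚ) ≤ ((⌈(a : ℚ) / (b : ℚ)⌉ - 1 : Int) : ℚ) := by
        exact_mod_cast Int.ceil_le.mpr hcon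
      push_cast at this; linarith
    have hq : ((⌈(a : ℚ) / (b : ℚ)⌉ - 1 : Int) : ℚ) * (b : ℚ) < (a : ℚ) :=
      (lt_div_iff₀ hbq).mp hlt
    exact_mod_cast hq
  · have h := Int.le_ceil (α := ℚ) ((a : ℚ) / (b : ℚ))
    have hq : (a : ℚ) ≤ (⌈(a : ℚ) / (b : ℚ)⌉ : ℚ) * (b : ℚ) := (div_le_iff₀ hbq).mp h
    exact_mod_cast hq

-- any nonzero divisor, via a/b = (-a)/(-b)
theorem ceil_eq_neg_floordiv_neg (a b : Int) (hb : b ≠ 0) :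
    ⌈(a : ℚ) / (b : ℚ)⌉ = -(PySem.Int.floordiv (-a) b) := by
  rcases lt_or_gt_of_ne hb with hneg | hpos
  · have hpos' : (0 : Int) < -b := by omega
    have hcast : ((a : ℚ)) / (b : ℚ) = ((-a : Int) : ℚ) / ((-b : Int) : ℚ) := by
      push_cast; rw [neg_div_neg_eq]
    have h1 := ceil_eq_neg_floordiv_neg_of_pos (-a) (-b) hpos'
    have h2 : PySem.Int.floordiv (-(-a)) (-b) = PySem.Int.floordiv (-a) b := by
      simpa using PySem.Int.floordiv_neg_neg (-a) b
    rw [hcast, h1, h2]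
  · exact ceil_eq_neg_floordiv_neg_of_pos a b hpos

-- A's step, seen as a function of the computed day
def dStep (complete : List (Int × Int)) (will : Int) : List (Int × Int) :=
  match complete.getLast? with
  | none => complete ++ [(will, 1)]
  | some last =>
      if last.1 < will then complete ++ [(will, 1)]
      else complete.dropLast ++ [(last.1, last.2 + 1)]

theorem aStep_eq_dStep (complete : List (Int × Int)) (ps : Int × Int) (h : ps.2 ≠ 0) :
    aStep complete ps = dStep complete (-(PySem.Int.floordiv (-(100 - ps.1)) ps.2)) := by
  simp only [aStep, dStep, ceil_eq_neg_floordiv_neg (100 - ps.1) ps.2 h]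

-- key invariant: folding dStep from a state whose last group is (m, c)
theorem key (days : List Int) (pre : List (Int × Int)) (m c : Int) :
    ((days.foldl dStep (pre ++ [(m, c)])).map (fun x => x.2))
      = pre.map (fun x => x.2) ++ (c + (splitRun m days).1) :: groups (splitRun m days).2 := by
  induction days generalizing pre m c with
  | nil => simp [splitRun, groups]
  | cons d ds ih =>
      simp only [List.foldl_cons]
      by_cases hlt : m < d
      · have hnle : ¬ d ≤ m := by omega
        have hstep : dStep (pre ++ [(m, c)]) d = (pre ++ [(m, c)]) ++ [(d, 1)] := by
          simp [dStep, hlt]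
        have hsr : splitRun m (d :: ds) = (0, d :: ds) := by
          simp [splitRun, hnle]
        rw [hstep, ih (pre ++ [(m, c)]) d 1, hsr]
        simp only [groups]
        simp
        omega
      · have hle : d ≤ m := by omega
        have hstep : dStep (pre ++ [(m, c)]) d = pre ++ [(m, c + 1)] := by
          simp [dStep, hlt]
        have hsr : splitRun m (d :: ds)
            = ((splitRun m ds).1 + 1, (splitRun m ds).2) := by
          simp [splitRun, hle]
        rw [hstep, ih pre m (c + 1), hsr]
        simp
        omega

theorem map_snd_foldl_dStep (days : List Int) :
    ((days.foldl dStep []).map (fun x => x.2)) = groups days := by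
  cases days with
  | nil => simp [groups]
  | cons d ds =>
      simp only [List.foldl_cons]
      have h0 : dStep [] d = [] ++ [(d, 1)] := by simp [dStep]
      rw [h0, key ds [] d 1]
      simp only [groups]
      simp
      omega

theorem foldl_aStep_eq (zs : List (Int × Int)) (init : List (Int × Int))
    (hp : ∀ p ∈ zs, p.2 ≠ 0) :
    zs.foldl aStep init
      = zs.foldl (fun c ps => dStep c (-(PySem.Int.floordiv (-(100 - ps.1)) ps.2))) init := by
  induction zs generalizing init with
  | nil => rfl
  | cons x xs ih =>
      simp only [List.foldl_cons]
      rw [aStep_eq_dStep init x (hp x (by simp))]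
      exact ih _ (fun p hm => hp p (by simp [hm]))

theorem solution_eq_alt (progresses speeds : List Int)
    (hp : ∀ p ∈ progresses.zip speeds, p.2 ≠ 0) :
    solution progresses speeds = solution_alt progresses speeds := by
  unfold solution solution_alt
  rw [foldl_aStep_eq _ _ hp]
  have hfm := List.foldl_map (f := fun ps : Int × Int => -(PySem.Int.floordiv (-(100 - ps.1)) ps.2))
    (g := dStep) (l := progresses.zip speeds) (init := ([] : List (Int × Int)))
  rw [← hfm, map_snd_foldl_dStep]

-- ===== VERDICT (by name: the statement is the Claim_ definition above) =====
theorem solution_spec : Claim_equal_solution := by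
  intro progresses speeds _ hpre
  unfold Spec_solution
  exact solution_eq_alt progresses speeds hpre
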